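-- pv_equiv track=rewrite | github.com/andreu-ferre/Project-Euler-solutions | pe19.py | issunday
-- ===== SOURCE A (Python) =====
-- def isleap(year):
-- 	x = year % 4
-- 	y = year % 400
-- 	if x == 0 and year % 100 == 0:
-- 		if y == 0:
-- 			return True
-- 		else:
-- 			return False
-- 	elif x == 0 and year % 100 != 0:
-- 		return True
-- 	elif not x == 0:
-- 		return False
--
-- def issunday(tup):
-- 	days = 0
-- 	start = (1, 1, 1901)
-- 	yeardays = (tup[2] - start[2]) // 4 + 365 * (tup[2] - start[2])
-- 	days += yeardays
-- 	D={1: 31, 3: 31, 4: 30, 5: 31, 6: 30, 7: 31, 8: 31, 9: 30, 10: 31, 11: 30, 12: 31}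
-- 	if isleap(tup[2]):
-- 		D[2] = 29
-- 	else:
-- 		D[2] = 28
-- 	monthdays = 0
-- 	if tup[1] != 1:
-- 		for n in range(1, tup[1]):
-- 			monthdays += D[n]
-- 	days += monthdays
-- 	if days % 7 == 5:
-- 		return True
-- 	else:
-- 		return False
-- ===== SOURCE B (Python) =====
-- # B: replaces the per-month summation loop by an O(1) cumulative month-length table lookup.
-- _CUM = (0, 31, 59, 90, 120, 151, 181, 212, 243, 273, 304, 334, 365)
--
-- def isleap(year):
--     return year % 4 == 0 and (year % 100 != 0 or year % 400 == 0)
--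
-- def issunday(tup):
--     yeardays = (tup[2] - 1901) // 4 + 365 * (tup[2] - 1901)
--     monthdays = _CUM[tup[1] - 1] if tup[1] >= 1 else 0
--     if tup[1] > 2 and isleap(tup[2]):
--         monthdays += 1
--     return (yeardays + monthdays) % 7 == 5
-- ===== Notes on version B (the rewrite author's own statement) =====
-- stated objective: simpler
-- what changed: The per-month dict-summation loop is replaced by a single lookup in a precomputed cumulative month-length table plus a leap-day adjustment, keeping A's year arithmetic unchanged.
import Mathlib
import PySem

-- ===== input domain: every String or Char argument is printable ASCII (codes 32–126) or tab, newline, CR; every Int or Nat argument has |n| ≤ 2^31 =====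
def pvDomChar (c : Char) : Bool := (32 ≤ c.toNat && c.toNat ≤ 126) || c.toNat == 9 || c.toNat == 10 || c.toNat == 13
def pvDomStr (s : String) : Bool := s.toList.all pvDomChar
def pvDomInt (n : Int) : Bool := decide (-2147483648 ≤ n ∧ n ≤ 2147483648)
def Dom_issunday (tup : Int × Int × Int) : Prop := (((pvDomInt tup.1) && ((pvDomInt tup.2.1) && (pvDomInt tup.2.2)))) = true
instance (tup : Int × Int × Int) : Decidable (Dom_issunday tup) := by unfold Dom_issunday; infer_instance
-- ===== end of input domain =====

-- B replaces A's per-month dict-summation loop by one lookup in a precomputed cumulative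
-- month-length table plus a leap-day adjustment (objective: simpler); same year arithmetic.

-- ===== PORT A =====
def isleapA (year : Int) : Bool :=
  let x := PySem.Int.mod year 4
  let y := PySem.Int.mod year 400
  if x = 0 ∧ PySem.Int.mod year 100 = 0 then
    (if y = 0 then true else false)
  else if x = 0 ∧ ¬ (PySem.Int.mod year 100 = 0) then true
  else if ¬ (x = 0) then false
  else false  -- unreachable: the three Python branches are exhaustive

def issunday (tup : Int × Int × Int) : Bool :=
  let days : Int := 0
  let start : Int × Int × Int := (1, 1, 1901)
  let yeardays := PySem.Int.floordiv (tup.2.2 - start.2.2) 4 + 365 * (tup.2.2 - start.2.2)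
  let days := days + yeardays
  let D : PySem.Dict Int Int :=
    PySem.Dict.ofList [(1,31),(3,31),(4,30),(5,31),(6,30),(7,31),(8,31),(9,30),(10,31),(11,30),(12,31)]
  let D := if isleapA tup.2.2 then D.insert 2 29 else D.insert 2 28
  -- D[n] under Pre_ (month ≤ 13) always hits a key; default 0 is never used inside Pre_
  let monthdays : Int :=
    if tup.2.1 ≠ 1 then
      (PySem.List.pyRange 1 tup.2.1 1).foldl (fun acc n => acc + D.getD n 0) 0
    else 0
  let days := days + monthdays
  if PySem.Int.mod days 7 = 5 then true else false

-- ===== PORT B =====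
def cumB : List Int := [0, 31, 59, 90, 120, 151, 181, 212, 243, 273, 304, 334, 365]

def isleapB (year : Int) : Bool :=
  decide (PySem.Int.mod year 4 = 0 ∧
    (¬ PySem.Int.mod year 100 = 0 ∨ PySem.Int.mod year 400 = 0))

def issunday_alt (tup : Int × Int × Int) : Bool :=
  let yeardays := PySem.Int.floordiv (tup.2.2 - 1901) 4 + 365 * (tup.2.2 - 1901)
  -- _CUM[tup[1]-1]: under Pre_ (month ≤ 13) the index is in range; default 0 never used inside Pre_
  let monthdays : Int := if tup.2.1 ≥ 1 then PySem.List.pyGetD cumB (tup.2.1 - 1) 0 else 0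
  let monthdays := if tup.2.1 > 2 ∧ isleapB tup.2.2 = true then monthdays + 1 else monthdays
  decide (PySem.Int.mod (yeardays + monthdays) 7 = 5)

-- ===== PRECONDITION & SPEC =====
-- Pre_ excludes month ≥ 14, where A raises KeyError (and B raises IndexError).
def Pre_issunday (tup : Int × Int × Int) : Prop := tup.2.1 ≤ 13
instance (tup : Int × Int × Int) : Decidable (Pre_issunday tup) := by unfold Pre_issunday; infer_instance
def pvWitness_issunday : (Int × Int × Int) := (7, 6, 1964)

def Spec_issunday (tup : Int × Int × Int) (out : Bool) : Prop := out = issunday_alt tup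
instance (tup : Int × Int × Int) (out : Bool) : Decidable (Spec_issunday tup out) := by unfold Spec_issunday; infer_instance

-- ===== CLAIM (what is proved, stated in full; the proofs are below) =====
def Claim_equal_issunday : Prop := ∀ (tup : Int × Int × Int), Dom_issunday tup → Pre_issunday tup → Spec_issunday tup (issunday tup)

-- ===== LEMMAS AND PROOFS =====

theorem leap_eq (y : Int) : isleapA y = isleapB y := by
  simp only [isleapA, isleapB]
  by_cases h4 : PySem.Int.mod y 4 = 0 <;>
    by_cases h100 : PySem.Int.mod y 100 = 0 <;>
      by_cases h400 : PySem.Int.mod y 400 = 0 <;>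
        (rw [PySem.Int.mod_eq_zero_iff_dvd] at h4 h100 h400; simp [h4, h100, h400])

-- A's month loop (leap flag abstracted as b) equals B's table lookup plus leap indicator,
-- for every month m ≤ 13.
theorem monthsum_eq (b : Bool) (m : Int) (hm : m ≤ 13) :
    (if m ≠ 1 then
      (PySem.List.pyRange 1 m 1).foldl
        (fun acc n => acc +
          ((if b then
              (PySem.Dict.ofList [((1:Int),(31:Int)),(3,31),(4,30),(5,31),(6,30),(7,31),(8,31),(9,30),(10,31),(11,30),(12,31)]).insert 2 29
            else
              (PySem.Dict.ofList [((1:Int),(31:Int)),(3,31),(4,30),(5,31),(6,30),(7,31),(8,31),(9,30),(10,31),(11,30),(12,31)]).insert 2 28).getD n 0)) 0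
     else 0)
    = (if m ≥ 1 then PySem.List.pyGetD cumB (m - 1) 0 else 0) + (if 2 < m ∧ b = true then 1 else 0) := by
  by_cases h1 : m ≤ 1
  · by_cases he : m = 1
    · subst he; cases b <;> decide
    · have hr : PySem.List.pyRange 1 m 1 = [] := by
        rw [PySem.List.pyRange_one]
        have : (m - 1).toNat = 0 := by omega
        simp [this]
      rw [if_pos he, hr]
      have h2 : ¬ (2 < m ∧ b = true) := by
        intro ⟨h, _⟩; omega
      have h3 : ¬ (m ≥ 1) := by omega
      simp [h2, h3]
  · have h2 : 2 ≤ m := by omega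
    interval_cases m <;> cases b <;> decide

theorem issunday_spec : Claim_equal_issunday := by
  unfold Claim_equal_issunday Spec_issunday Pre_issunday
  intro tup _ hpre
  simp only [issunday, issunday_alt, leap_eq]
  rw [monthsum_eq (isleapB tup.2.2) tup.2.1 hpre]
  rcases h : decide (PySem.Int.mod
      ((PySem.Int.floordiv (tup.2.2 - 1901) 4 + 365 * (tup.2.2 - 1901)) +
        ((if tup.2.1 ≥ 1 then PySem.List.pyGetD cumB (tup.2.1 - 1) 0 else 0) +
          (if 2 < tup.2.1 ∧ isleapB tup.2.2 = true then 1 else 0))) 7 = 5) <;>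
    simp_all <;> split_ifs at * <;> omega

-- ===== VERDICT (by name: the statement is the Claim_ definition above) =====
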